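-- pv_equiv track=rewrite | github.com/ipetkova/LegendrianAtlas | GridMoves1.py | generate_commutation_equivalent_grids
-- ===== SOURCE A (Python) =====
-- def commutable (x1,o1,x2,o2):
--     nested = (x1 > min(x2,o2) and x1 < max(x2,o2)) and (o1 > min(x2,o2) and o1 < max(x2,o2))
--     side_by_side = (x1 < min(x2,o2) and o1 < min(x2,o2)) or (x1 > max(x2,o2) and o1 > max(x2,o2))
--     return (nested or side_by_side)
--
-- def col_swap(col,X,O):
--     X_new = X[:col]+(X[col+1],X[col])+X[col+2:]
--     O_new = O[:col]+(O[col+1],O[col])+O[col+2:]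
--     return X_new, O_new
--
-- def row_swap(row,X,O):
--     x_idx_row1 = X.index(row)
--     x_idx_row2 = X.index(row+1)
--     o_idx_row1 = O.index(row)
--     o_idx_row2 = O.index(row+1)
--     x_idx_1 = min(x_idx_row1,x_idx_row2)
--     x_idx_2 = max(x_idx_row1,x_idx_row2)
--     o_idx_1 = min(o_idx_row1,o_idx_row2)
--     o_idx_2 = max(o_idx_row1,o_idx_row2)
--     X_new = X[:x_idx_1] + (row+(1*(x_idx_row1<x_idx_row2)),) + X[x_idx_1+1:x_idx_2] + (row+(1*(x_idx_row1>x_idx_row2)),) + X[x_idx_2+1:]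
--     O_new = O[:o_idx_1] + (row+(1*(o_idx_row1<o_idx_row2)),) + O[o_idx_1+1:o_idx_2] + (row+(1*(o_idx_row1>o_idx_row2)),) + O[o_idx_2+1:]
--     del x_idx_1, x_idx_2, o_idx_1, o_idx_2
--     return X_new,O_new
--
-- def generate_commutation_equivalent_grids(grid):
--     X,O,n,new_grids = grid[0],grid[1],len(grid[0]),{grid}
--     for i in range(0,n-1):
--         x1, o1 = X[i], O[i]
--         x2, o2 = X[i+1], O[i+1]
--         if commutable(x1,o1,x2,o2):
--             new_grids.add(col_swap(i,X,O))
--     for i in range(0,n-1):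
--         x1, o1 = X.index(i), O.index(i)
--         x2, o2 = X.index(i+1), O.index(i+1)
--         if commutable(x1,o1,x2,o2):
--             new_grids.add(row_swap(i,X,O))
--     return new_grids
-- ===== SOURCE B (Python) =====
-- def commutable(x1, o1, x2, o2):
--     lo1, hi1 = min(x1, o1), max(x1, o1)
--     lo2, hi2 = min(x2, o2), max(x2, o2)
--     return hi1 < lo2 or hi2 < lo1 or (lo2 < lo1 and hi1 < hi2)
--
-- def _adjacent_swaps(X, O):
--     # all grids obtained by one commutation of adjacent columns
--     moves = set()
--     for i in range(len(X) - 1):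
--         if commutable(X[i], O[i], X[i + 1], O[i + 1]):
--             moves.add((X[:i] + (X[i + 1], X[i]) + X[i + 2:],
--                        O[:i] + (O[i + 1], O[i]) + O[i + 2:]))
--     return moves
--
-- def _transpose(X, O):
--     # inverse permutations: entry v holds the column where value v sits
--     n = len(X)
--     return (tuple(X.index(v) for v in range(n)),
--             tuple(O.index(v) for v in range(n)))
--
-- def generate_commutation_equivalent_grids(grid):
--     X, O = grid
--     out = {grid}
--     out |= _adjacent_swaps(X, O)
--     if len(X) > 1:
--         # row commutations are column commutations of the transposed grid
--         Xt, Ot = _transpose(X, O)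
--         for Xs, Os in _adjacent_swaps(Xt, Ot):
--             out.add(_transpose(Xs, Os))
--     return out
-- ===== Notes on version B (the rewrite author's own statement) =====
-- stated objective: alternative
-- what changed: B has a single adjacent-column commutation pass; row commutations are obtained by transposing the grid (inverting both permutations), running the same column pass on the transpose, and transposing each result back, replacing A's separate row loop with its six .index scans and min/max splicing row_swap; the commutable predicate is re-expressed as a disjoint-or-strictly-nested interval test.
import Mathlib
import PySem

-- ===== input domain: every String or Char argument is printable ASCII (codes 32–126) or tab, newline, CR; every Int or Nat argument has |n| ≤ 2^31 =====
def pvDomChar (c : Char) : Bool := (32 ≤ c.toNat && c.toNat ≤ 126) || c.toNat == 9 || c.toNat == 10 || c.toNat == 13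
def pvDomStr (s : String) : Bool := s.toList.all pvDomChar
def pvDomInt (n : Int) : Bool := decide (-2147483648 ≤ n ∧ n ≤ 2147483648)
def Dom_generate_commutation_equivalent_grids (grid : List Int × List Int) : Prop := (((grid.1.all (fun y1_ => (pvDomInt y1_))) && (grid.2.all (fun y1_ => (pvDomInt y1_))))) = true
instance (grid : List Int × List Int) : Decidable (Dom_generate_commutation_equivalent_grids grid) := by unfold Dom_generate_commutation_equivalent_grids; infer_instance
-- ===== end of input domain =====

-- B runs one adjacent-column commutation pass and obtains row commutations by transposing the
-- grid (inverting both permutations), running the same column pass, and transposing back;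
-- equivalence proved on well-formed grids (X and O permutations of 0..n-1).


-- ===== PORT A =====
-- commutable(x1,o1,x2,o2), literally
def pvCommutable (x1 o1 x2 o2 : Int) : Bool :=
  ((decide (x1 > min x2 o2) && decide (x1 < max x2 o2)) &&
   (decide (o1 > min x2 o2) && decide (o1 < max x2 o2))) ||
  ((decide (x1 < min x2 o2) && decide (o1 < min x2 o2)) ||
   (decide (x1 > max x2 o2) && decide (o1 > max x2 o2)))

-- col_swap(col,X,O): X[:col]+(X[col+1],X[col])+X[col+2:] — slices of a Nat index are
-- take/drop (PySem.List.slice_natCast/slice_to_natCast/slice_from_natCast); X[col], X[col+1]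
-- are in range on every call A makes under Pre_, so the total getD form is exact there.
def pvColSwap (col : Nat) (X O : List Int) : List Int × List Int :=
  (X.take col ++ [X.getD (col+1) 0, X.getD col 0] ++ X.drop (col+2),
   O.take col ++ [O.getD (col+1) 0, O.getD col 0] ++ O.drop (col+2))

-- row_swap(row,X,O): .index is PySem.List.index?; under Pre_ every .index call succeeds,
-- so the .getD 0 total form is exact there; X[a:b] of Nat bounds is (drop a).take (b-a).
def pvRowSwap (row : Int) (X O : List Int) : List Int × List Int :=
  let xr1 := (PySem.List.index? X row).getD 0
  let xr2 := (PySem.List.index? X (row+1)).getD 0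
  let or1 := (PySem.List.index? O row).getD 0
  let or2 := (PySem.List.index? O (row+1)).getD 0
  let xi1 := min xr1 xr2
  let xi2 := max xr1 xr2
  let oi1 := min or1 or2
  let oi2 := max or1 or2
  (X.take xi1 ++ [row + (if xr1 < xr2 then 1 else 0)] ++ (X.drop (xi1+1)).take (xi2 - (xi1+1)) ++
     [row + (if xr1 > xr2 then 1 else 0)] ++ X.drop (xi2+1),
   O.take oi1 ++ [row + (if or1 < or2 then 1 else 0)] ++ (O.drop (oi1+1)).take (oi2 - (oi1+1)) ++
     [row + (if or1 > or2 then 1 else 0)] ++ O.drop (oi2+1))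

-- generate_commutation_equivalent_grids: {grid} then the two range(0,n-1) loops, each
-- conditional set.add; a grid (X,O) is the element [X, O].
def generate_commutation_equivalent_grids (grid : List Int × List Int) : List (List (List Int)) :=
  let X := grid.1
  let O := grid.2
  let n := X.length
  let s0 : PySem.Set (List (List Int)) := PySem.Set.add PySem.Set.empty [X, O]
  let s1 := (List.range (n-1)).foldl (fun s i =>
    if pvCommutable (X.getD i 0) (O.getD i 0) (X.getD (i+1) 0) (O.getD (i+1) 0) then
      let p := pvColSwap i X O
      PySem.Set.add s [p.1, p.2]
    else s) s0
  (List.range (n-1)).foldl (fun s i =>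
    if pvCommutable ((PySem.List.index? X (Int.ofNat i)).getD 0 : Nat)
                    ((PySem.List.index? O (Int.ofNat i)).getD 0 : Nat)
                    ((PySem.List.index? X (Int.ofNat i + 1)).getD 0 : Nat)
                    ((PySem.List.index? O (Int.ofNat i + 1)).getD 0 : Nat) then
      let p := pvRowSwap (Int.ofNat i) X O
      PySem.Set.add s [p.1, p.2]
    else s) s1

-- ===== PORT B =====
-- commutable as in Source B: disjoint intervals or strict nesting
def altCommutable (x1 o1 x2 o2 : Int) : Bool :=
  let lo1 := min x1 o1
  let hi1 := max x1 o1
  let lo2 := min x2 o2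
  let hi2 := max x2 o2
  decide (hi1 < lo2) || decide (hi2 < lo1) || (decide (lo2 < lo1) && decide (hi1 < hi2))

-- _adjacent_swaps(X,O): the single commutation pass, a set of (X,O) pairs
def altAdjSwaps (X O : List Int) : PySem.Set (List Int × List Int) :=
  (List.range (X.length - 1)).foldl (fun s i =>
    if altCommutable (X.getD i 0) (O.getD i 0) (X.getD (i+1) 0) (O.getD (i+1) 0) then
      PySem.Set.add s (X.take i ++ [X.getD (i+1) 0, X.getD i 0] ++ X.drop (i+2),
                       O.take i ++ [O.getD (i+1) 0, O.getD i 0] ++ O.drop (i+2))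
    else s) PySem.Set.empty

-- _transpose(X,O): tuple(X.index(v) for v in range(len(X))) twice; .index is index?,
-- total .getD 0 form exact where B runs it (inside the len>1 guard under Pre_)
def altTranspose (X O : List Int) : List Int × List Int :=
  ((PySem.List.pyRange 0 (X.length : Int) 1).map (fun v => (((PySem.List.index? X v).getD 0 : Nat) : Int)),
   (PySem.List.pyRange 0 (X.length : Int) 1).map (fun v => (((PySem.List.index? O v).getD 0 : Nat) : Int)))

def generate_commutation_equivalent_grids_alt (grid : List Int × List Int) : List (List (List Int)) :=
  let X := grid.1
  let O := grid.2
  let out0 : PySem.Set (List (List Int)) := PySem.Set.add PySem.Set.empty [X, O]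
  let out1 := (altAdjSwaps X O).foldl (fun s p => PySem.Set.add s [p.1, p.2]) out0
  if X.length > 1 then
    let t := altTranspose X O
    (altAdjSwaps t.1 t.2).foldl (fun s p =>
      let b := altTranspose p.1 p.2
      PySem.Set.add s [b.1, b.2]) out1
  else out1

-- ===== PRECONDITION & SPEC =====
-- Pre_ admits degenerate grids (n ≤ 1, where both loops are empty) and well-formed grid
-- diagrams: X and O of equal length n, each containing every value 0..n-1 (so both are
-- permutations of 0..n-1). A malformed grid with n ≥ 2 (length mismatch or duplicated
-- entries) either makes A raise ValueError/IndexError or makes A's result depend on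
-- accidental first-occurrence .index scans, which is not grid behaviour worth specifying.
def Pre_generate_commutation_equivalent_grids (grid : List Int × List Int) : Prop :=
  grid.1.length ≤ 1 ∨
  (grid.2.length = grid.1.length ∧
   ∀ i : Nat, i < grid.1.length → (Int.ofNat i) ∈ grid.1 ∧ (Int.ofNat i) ∈ grid.2)

instance (grid : List Int × List Int) : Decidable (Pre_generate_commutation_equivalent_grids grid) := by
  unfold Pre_generate_commutation_equivalent_grids; infer_instance

def pvWitness_generate_commutation_equivalent_grids : (List Int × List Int) := ([0, 1, 2], [1, 2, 0])

def Spec_generate_commutation_equivalent_grids (grid : List Int × List Int) (out : List (List (List Int))) : Prop := out = generate_commutation_equivalent_grids_alt grid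
instance (grid : List Int × List Int) (out : List (List (List Int))) : Decidable (Spec_generate_commutation_equivalent_grids grid out) := by unfold Spec_generate_commutation_equivalent_grids; infer_instance

-- ===== CLAIM (what is proved, stated in full; the proofs are below) =====
def Claim_equal_generate_commutation_equivalent_grids : Prop := ∀ (grid : List Int × List Int), Dom_generate_commutation_equivalent_grids grid → Pre_generate_commutation_equivalent_grids grid → Spec_generate_commutation_equivalent_grids grid (generate_commutation_equivalent_grids grid)

-- ===== LEMMAS AND PROOFS =====

-- value swap used only by the proofs to describe a row commutation
def altSwapVal (r v : Int) : Int := if v = r then r + 1 else if v = r + 1 then r else v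

-- first position of v, as the proofs read it (total form of index?)
def posN (X : List Int) (v : Int) : Nat := (PySem.List.index? X v).getD 0

theorem commutable_eq (x1 o1 x2 o2 : Int) :
    pvCommutable x1 o1 x2 o2 = altCommutable x1 o1 x2 o2 := by
  have hb : ∀ a b : Bool, (a ↔ b) → a = b := by decide
  apply hb
  simp only [pvCommutable, altCommutable, Bool.or_eq_true, Bool.and_eq_true, decide_eq_true_eq]
  simp only [min_def, max_def]
  split_ifs <;> omega

theorem colswap_eq (X : List Int) (i : Nat) (h : i + 1 < X.length) :
    X.take i ++ [X.getD (i+1) 0, X.getD i 0] ++ X.drop (i+2)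
      = (X.set i (X.getD (i+1) 0)).set (i+1) (X.getD i 0) := by
  induction X generalizing i with
  | nil => simp at h
  | cons x t ih =>
    cases i with
    | zero =>
      cases t with
      | nil => simp at h
      | cons y u => simp [List.set]
    | succ j =>
      simp only [List.length_cons] at h
      have := ih j (by omega)
      simp [List.set] at this ⊢
      exact this

theorem splice_eq_set_set (X : List Int) (p q : Nat) (a b : Int) (hpq : p < q) (hq : q < X.length) :
    X.take p ++ [a] ++ (X.drop (p+1)).take (q - (p+1)) ++ [b] ++ X.drop (q+1)
      = (X.set p a).set q b := by
  induction X generalizing p q with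
  | nil => simp at hq
  | cons x t ih =>
    cases p with
    | zero =>
      cases q with
      | zero => omega
      | succ j =>
        simp only [List.length_cons] at hq
        have hset : t.set j b = t.take j ++ b :: t.drop (j+1) :=
          List.set_eq_take_cons_drop b (by omega)
        simp [List.set, hset]
    | succ p' =>
      cases q with
      | zero => omega
      | succ j =>
        simp only [List.length_cons] at hq
        have := ih p' j (by omega) (by omega)
        simp only [List.set, List.drop_succ_cons, List.take_succ_cons, Nat.succ_sub_succ,
          List.cons_append, List.append_assoc] at this ⊢
        simp only [List.nil_append] at this ⊢
        rw [this]

theorem map_swap_eq_set_set (X : List Int) (hnd : X.Nodup) (r : Int) (p q : Nat)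
    (hp : p < X.length) (hq : q < X.length) (hxp : X[p] = r) (hxq : X[q] = r + 1) :
    X.map (altSwapVal r) = (X.set p (r+1)).set q r := by
  apply List.ext_getElem
  · simp
  · intro j hj hj2
    have hjX : j < X.length := by simpa using hj
    rw [List.getElem_map, List.getElem_set, List.getElem_set]
    have hinj : ∀ a b : Nat, (ha : a < X.length) → (hb : b < X.length) → X[a] = X[b] → a = b := by
      intro a b ha hb hab
      exact (List.Nodup.getElem_inj_iff hnd).mp hab
    by_cases hjq : q = j
    · subst hjq
      rw [hxq]
      simp [altSwapVal]
    · rw [if_neg hjq]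
      by_cases hjp : p = j
      · subst hjp
        simp [altSwapVal, hxp]
      · rw [if_neg hjp]
        have h1 : X[j] ≠ r := fun h => hjp (hinj p j hp hjX (by rw [h, hxp]))
        have h2 : X[j] ≠ r + 1 := fun h => hjq (hinj q j hq hjX (by rw [h, hxq]))
        simp [altSwapVal, h1, h2]

theorem rowswap_eq (X : List Int) (hnd : X.Nodup) (r : Int) (p q : Nat)
    (hp : PySem.List.index? X r = some p) (hq : PySem.List.index? X (r+1) = some q) :
    X.take (min p q) ++ [r + (if p < q then 1 else 0)] ++
      (X.drop (min p q + 1)).take (max p q - (min p q + 1)) ++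
      [r + (if p > q then 1 else 0)] ++ X.drop (max p q + 1)
      = X.map (altSwapVal r) := by
  obtain ⟨hpl, hxp, -⟩ := PySem.List.getElem_of_index?_eq_some hp
  obtain ⟨hql, hxq, -⟩ := PySem.List.getElem_of_index?_eq_some hq
  have hne : p ≠ q := by
    intro h; subst h; rw [hxp] at hxq; omega
  rw [map_swap_eq_set_set X hnd r p q hpl hql hxp hxq]
  rcases Nat.lt_or_ge p q with hlt | hge
  · rw [min_eq_left (le_of_lt hlt), max_eq_right (le_of_lt hlt), if_pos hlt,
      if_neg (by omega : ¬ p > q)]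
    simpa using splice_eq_set_set X p q (r+1) r hlt hql
  · have hlt : q < p := by omega
    rw [min_eq_right (le_of_lt hlt), max_eq_left (le_of_lt hlt), if_neg (by omega : ¬ p < q),
      if_pos hlt]
    have := splice_eq_set_set X q p r (r+1) hlt hpl
    rw [List.set_comm r (r+1) (Ne.symm hne)] at this
    simpa using this

theorem perm_of_covers (X : List Int) (n : Nat) (hlen : X.length = n)
    (hmem : ∀ i : Nat, i < n → (Int.ofNat i) ∈ X) :
    X.Perm ((List.range n).map Int.ofNat) := by
  have hR : ((List.range n).map (Int.ofNat)).Nodup :=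
    List.Nodup.map (fun a b h => Int.ofNat.inj h) List.nodup_range
  have hsub : ((List.range n).map (Int.ofNat)) ⊆ X := by
    intro x hx
    simp only [List.mem_map, List.mem_range] at hx
    obtain ⟨i, hi, rfl⟩ := hx
    exact hmem i hi
  have hlenR : X.length ≤ ((List.range n).map (Int.ofNat)).length := by simp [hlen]
  exact ((List.subperm_of_subset hR hsub).perm_of_length_le hlenR).symm

theorem nodup_of_covers (X : List Int) (n : Nat) (hlen : X.length = n)
    (hmem : ∀ i : Nat, i < n → (Int.ofNat i) ∈ X) : X.Nodup :=
  (perm_of_covers X n hlen hmem).symm.nodup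
    (List.Nodup.map (fun a b h => Int.ofNat.inj h) List.nodup_range)

-- folding conditional adds into a set, then re-adding its g-images, is the direct
-- conditional g-image fold (Set.add deduplicates either way)
theorem foldl_add_map {ι α β : Type} [BEq α] [LawfulBEq α] [BEq β] [LawfulBEq β]
    (I : List ι) (c : ι → Bool) (f : ι → α) (g : α → β) :
    ∀ (t : PySem.Set α) (s0 : PySem.Set β),
    (I.foldl (fun s i => if c i then PySem.Set.add s (f i) else s) t).foldl
        (fun s x => PySem.Set.add s (g x)) s0
      = I.foldl (fun s i => if c i then PySem.Set.add s (g (f i)) else s)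
          (t.foldl (fun s x => PySem.Set.add s (g x)) s0) := by
  induction I with
  | nil => intro t s0; rfl
  | cons i I ih =>
    intro t s0
    simp only [List.foldl_cons]
    rw [ih]
    congr 1
    by_cases hc : c i
    · simp only [hc, if_true]
      by_cases hm : f i ∈ t
      · rw [PySem.Set.add_of_mem hm, eq_comm, PySem.Set.add_of_mem]
        exact (PySem.Set.mem_foldl_add _ _ _ _).mpr (Or.inr ⟨f i, hm, rfl⟩)
      · rw [PySem.Set.add_of_not_mem hm, List.foldl_append]
        rfl
    · simp [hc]

theorem posN_index? (X : List Int) (v : Int) (hv : v ∈ X) :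
    PySem.List.index? X v = some (posN X v) := by
  obtain ⟨k, hk⟩ := Option.isSome_iff_exists.mp ((PySem.List.index?_isSome_iff X v).mpr hv)
  simp only [posN, hk, Option.getD_some]

theorem posN_spec (X : List Int) (v : Int) (hv : v ∈ X) :
    ∃ h : posN X v < X.length, X[posN X v] = v := by
  obtain ⟨h1, h2, -⟩ := PySem.List.getElem_of_index?_eq_some (posN_index? X v hv)
  exact ⟨h1, h2⟩

theorem posN_getElem (X : List Int) (hnd : X.Nodup) (j : Nat) (hj : j < X.length) :
    posN X X[j] = j := by
  have hv : X[j] ∈ X := List.getElem_mem hj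
  obtain ⟨h1, h2⟩ := posN_spec X X[j] hv
  exact (List.Nodup.getElem_inj_iff hnd).mp h2

theorem index?_eq_of_nodup (L : List Int) (hnd : L.Nodup) (j : Nat) (hj : j < L.length) :
    PySem.List.index? L L[j] = some j := by
  have h := posN_index? L L[j] (List.getElem_mem hj)
  rwa [posN_getElem L hnd j hj] at h

theorem length_map_pyRange (f : Int → Int) (n : Nat) :
    ((PySem.List.pyRange 0 (n : Int) 1).map f).length = n := by
  simp [PySem.List.length_pyRange_one]

theorem getElem_map_pyRange (f : Int → Int) (n k : Nat) (hk : k < n)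
    (h : k < ((PySem.List.pyRange 0 (n : Int) 1).map f).length) :
    ((PySem.List.pyRange 0 (n : Int) 1).map f)[k] = f (k : Int) := by
  rw [List.getElem_map, PySem.List.getElem_pyRange_one]
  norm_num

theorem getD_map_pyRange (f : Int → Int) (n k : Nat) (hk : k < n) (d : Int) :
    ((PySem.List.pyRange 0 (n : Int) 1).map f).getD k d = f (k : Int) := by
  have hl : k < ((PySem.List.pyRange 0 (n : Int) 1).map f).length := by
    rw [length_map_pyRange]; exact hk
  rw [List.getD_eq_getElem _ _ hl, getElem_map_pyRange f n k hk hl]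


theorem posN_inj (X : List Int) (v1 v2 : Int) (h1 : v1 ∈ X) (h2 : v2 ∈ X)
    (h : posN X v1 = posN X v2) : v1 = v2 := by
  obtain ⟨ha, hb⟩ := posN_spec X v1 h1
  obtain ⟨hc, hd⟩ := posN_spec X v2 h2
  have e1 : X[posN X v1]? = some v1 := by rw [List.getElem?_eq_getElem ha, hb]
  have e2 : X[posN X v2]? = some v2 := by rw [List.getElem?_eq_getElem hc, hd]
  rw [h] at e1
  rw [e1] at e2
  exact Option.some.inj e2

theorem swapVal_pair (i a n : Nat) (hi : i + 1 < n) (ha : a < n) :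
    ∃ a' : Nat, a' < n ∧ altSwapVal (i : Int) (a : Int) = (a' : Int) ∧
      altSwapVal (i : Int) (a' : Int) = (a : Int) := by
  refine ⟨if a = i then i + 1 else if a = i + 1 then i else a, by split_ifs <;> omega, ?_, ?_⟩ <;>
    · simp only [altSwapVal]
      split_ifs <;> omega

theorem length_splice (L : List Int) (i : Nat) (c d : Int) (hi : i + 1 < L.length) :
    (L.take i ++ [c, d] ++ L.drop (i+2)).length = L.length := by
  simp only [List.length_append, List.length_take, List.length_drop, List.length_cons,
    List.length_nil]
  omega

theorem nodup_of_getElem_inj (L : List Int)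
    (h : ∀ a b : Nat, (ha : a < L.length) → (hb : b < L.length) → L[a] = L[b] → a = b) :
    L.Nodup := by
  rw [List.nodup_iff_injective_getElem]
  intro ⟨a, ha⟩ ⟨b, hb⟩ hab
  exact Fin.ext (h a b ha hb hab)

theorem splice_entry (L T : List Int) (n i k : Nat)
    (hT : T = (PySem.List.pyRange 0 (n : Int) 1).map
        (fun v => (((PySem.List.index? L v).getD 0 : Nat) : Int)))
    (hi : i + 1 < n) (hk : k < n) :
    (T.take i ++ [T.getD (i+1) 0, T.getD i 0] ++ T.drop (i+2))[k]?
      = some ((posN L (altSwapVal (i : Int) (k : Int)) : Nat) : Int) := by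
  have hTlen : T.length = n := by rw [hT]; exact length_map_pyRange _ n
  have hTget : ∀ m : Nat, m < n → T.getD m 0 = ((posN L (m : Int) : Nat) : Int) := by
    intro m hm
    rw [hT]
    exact getD_map_pyRange _ n m hm 0
  rw [colswap_eq T i (by omega)]
  have hk' : k < ((T.set i (T.getD (i+1) 0)).set (i+1) (T.getD i 0)).length := by
    simp [hTlen]; omega
  rw [List.getElem?_eq_getElem hk']
  congr 1
  rw [List.getElem_set, List.getElem_set]
  by_cases h1 : i + 1 = k
  · rw [if_pos h1, hTget i (by omega)]
    have hs : altSwapVal (i : Int) (k : Int) = (i : Int) := by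
      simp only [altSwapVal]; split_ifs <;> omega
    rw [hs]
  · rw [if_neg h1]
    by_cases h2 : i = k
    · rw [if_pos h2, hTget (i+1) (by omega)]
      have hs : altSwapVal (i : Int) (k : Int) = ((i+1 : Nat) : Int) := by
        simp only [altSwapVal]; split_ifs <;> omega
      rw [hs]
    · rw [if_neg h2]
      have hs : altSwapVal (i : Int) (k : Int) = (k : Int) := by
        simp only [altSwapVal]; split_ifs <;> omega
      rw [hs]
      have : T[k]'(by omega) = T.getD k 0 := (List.getD_eq_getElem T 0 (by omega)).symm
      rw [this, hTget k hk]

theorem transpose_swap_back (L T' : List Int) (n i : Nat) (hlen : L.length = n)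
    (hcov : ∀ j : Nat, j < n → ((j : Nat) : Int) ∈ L) (hi : i + 1 < n)
    (hT'len : T'.length = n)
    (hT' : ∀ k : Nat, k < n → T'[k]? = some ((posN L (altSwapVal (i : Int) (k : Int)) : Nat) : Int)) :
    (PySem.List.pyRange 0 (n : Int) 1).map
        (fun k => (((PySem.List.index? T' k).getD 0 : Nat) : Int))
      = L.map (altSwapVal (i : Int)) := by
  have hnd : L.Nodup := nodup_of_covers L n hlen hcov
  have hperm : L.Perm ((List.range n).map Int.ofNat) := perm_of_covers L n hlen hcov
  have hvals : ∀ k : Nat, (hk : k < L.length) → ∃ w : Nat, w < n ∧ L[k] = ((w : Nat) : Int) := by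
    intro k hk
    have hmm : L[k] ∈ (List.range n).map Int.ofNat := hperm.mem_iff.mp (List.getElem_mem hk)
    simp only [List.mem_map, List.mem_range] at hmm
    obtain ⟨w, hw, hwe⟩ := hmm
    exact ⟨w, hw, hwe.symm⟩
  have hT'g : ∀ k : Nat, k < n → ∀ h2 : k < T'.length,
      T'[k] = ((posN L (altSwapVal (i : Int) (k : Int)) : Nat) : Int) := by
    intro k hk h2
    have := hT' k hk
    rw [List.getElem?_eq_getElem h2] at this
    exact Option.some.inj this
  have hndT' : T'.Nodup := by
    apply nodup_of_getElem_inj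
    intro a b ha hb hab
    have ha' : a < n := by omega
    have hb' : b < n := by omega
    rw [hT'g a ha' ha, hT'g b hb' hb] at hab
    have hab' : posN L (altSwapVal (i : Int) (a : Int)) = posN L (altSwapVal (i : Int) (b : Int)) := by
      exact_mod_cast hab
    obtain ⟨a', ha'2, hae, hai⟩ := swapVal_pair i a n hi ha'
    obtain ⟨b', hb'2, hbe, hbi⟩ := swapVal_pair i b n hi hb'
    rw [hae, hbe] at hab'
    have h3 := posN_inj L _ _ (hcov a' ha'2) (hcov b' hb'2) hab'
    have hab2 : a' = b' := by exact_mod_cast h3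
    have h4 : ((a : Nat) : Int) = ((b : Nat) : Int) := by rw [← hai, hab2, hbi]
    exact_mod_cast h4
  apply List.ext_getElem
  · rw [List.length_map, List.length_map, PySem.List.length_pyRange_one, hlen]
    simp
  · intro k h1 h2
    have hkn : k < n := by
      rw [List.length_map, PySem.List.length_pyRange_one] at h1
      omega
    rw [List.getElem_map, List.getElem_map, PySem.List.getElem_pyRange_one]
    obtain ⟨w, hw, hLk⟩ := hvals k (by omega)
    obtain ⟨w', hw', hswe, hswi⟩ := swapVal_pair i w n hi hw
    have h3 : w' < T'.length := by omega
    have hT'w : T'[w'] = ((k : Nat) : Int) := by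
      rw [hT'g w' hw' h3, hswi]
      have hp : posN L ((w : Nat) : Int) = k := by
        rw [← hLk]
        exact posN_getElem L hnd k (by omega)
      rw [hp]
    have hidx : PySem.List.index? T' (0 + ((k : Nat) : Int)) = some w' := by
      have h5 := index?_eq_of_nodup T' hndT' w' h3
      rw [hT'w] at h5
      rwa [zero_add]
    rw [hidx, Option.getD_some, hLk, hswe]

theorem alt_row_value (X O : List Int) (i : Nat)
    (hlenO : O.length = X.length)
    (hmemX : ∀ j : Nat, j < X.length → ((j : Nat) : Int) ∈ X)
    (hmemO : ∀ j : Nat, j < X.length → ((j : Nat) : Int) ∈ O)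
    (hin : i + 1 < X.length) :
    altTranspose
        (List.take i (altTranspose X O).1 ++
            [(altTranspose X O).1.getD (i+1) 0, (altTranspose X O).1.getD i 0] ++
          List.drop (i+2) (altTranspose X O).1)
        (List.take i (altTranspose X O).2 ++
            [(altTranspose X O).2.getD (i+1) 0, (altTranspose X O).2.getD i 0] ++
          List.drop (i+2) (altTranspose X O).2)
      = (X.map (altSwapVal (i : Int)), O.map (altSwapVal (i : Int))) := by
  simp only [altTranspose]
  have hT1len : ((PySem.List.pyRange 0 (X.length : Int) 1).map
      (fun v => (((PySem.List.index? X v).getD 0 : Nat) : Int))).length = X.length :=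
    length_map_pyRange _ _
  have hT2len : ((PySem.List.pyRange 0 (X.length : Int) 1).map
      (fun v => (((PySem.List.index? O v).getD 0 : Nat) : Int))).length = X.length :=
    length_map_pyRange _ _
  have hsx := length_splice ((PySem.List.pyRange 0 (X.length : Int) 1).map
      (fun v => (((PySem.List.index? X v).getD 0 : Nat) : Int))) i
      (((PySem.List.pyRange 0 (X.length : Int) 1).map
        (fun v => (((PySem.List.index? X v).getD 0 : Nat) : Int))).getD (i+1) 0)
      (((PySem.List.pyRange 0 (X.length : Int) 1).map
        (fun v => (((PySem.List.index? X v).getD 0 : Nat) : Int))).getD i 0)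
      (by rw [hT1len]; omega)
  rw [hT1len] at hsx
  have hsz := length_splice ((PySem.List.pyRange 0 (X.length : Int) 1).map
      (fun v => (((PySem.List.index? O v).getD 0 : Nat) : Int))) i
      (((PySem.List.pyRange 0 (X.length : Int) 1).map
        (fun v => (((PySem.List.index? O v).getD 0 : Nat) : Int))).getD (i+1) 0)
      (((PySem.List.pyRange 0 (X.length : Int) 1).map
        (fun v => (((PySem.List.index? O v).getD 0 : Nat) : Int))).getD i 0)
      (by rw [hT2len]; omega)
  rw [hT2len] at hsz
  rw [hsx]
  simp only [Prod.mk.injEq]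
  constructor
  · exact transpose_swap_back X _ X.length i rfl hmemX hin hsx
      (fun k hk => splice_entry X _ X.length i k rfl hin hk)
  · exact transpose_swap_back O _ X.length i hlenO hmemO hin hsz
      (fun k hk => splice_entry O _ X.length i k rfl hin hk)

theorem altAdjSwaps_fold (X O : List Int) (s0 : PySem.Set (List (List Int))) :
    (altAdjSwaps X O).foldl (fun s p => PySem.Set.add s [p.1, p.2]) s0
      = (List.range (X.length - 1)).foldl (fun s i =>
          if altCommutable (X.getD i 0) (O.getD i 0) (X.getD (i+1) 0) (O.getD (i+1) 0) then
            PySem.Set.add s [X.take i ++ [X.getD (i+1) 0, X.getD i 0] ++ X.drop (i+2),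
                             O.take i ++ [O.getD (i+1) 0, O.getD i 0] ++ O.drop (i+2)]
          else s) s0 := by
  unfold altAdjSwaps
  exact foldl_add_map (List.range (X.length - 1))
    (fun i => altCommutable (X.getD i 0) (O.getD i 0) (X.getD (i+1) 0) (O.getD (i+1) 0))
    (fun i => (X.take i ++ [X.getD (i+1) 0, X.getD i 0] ++ X.drop (i+2),
               O.take i ++ [O.getD (i+1) 0, O.getD i 0] ++ O.drop (i+2)))
    (fun p => [p.1, p.2]) PySem.Set.empty s0

theorem altAdjSwaps_fold_transpose (Y Z : List Int) (s0 : PySem.Set (List (List Int))) :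
    (altAdjSwaps Y Z).foldl (fun s p =>
        let b := altTranspose p.1 p.2
        PySem.Set.add s [b.1, b.2]) s0
      = (List.range (Y.length - 1)).foldl (fun s i =>
          if altCommutable (Y.getD i 0) (Z.getD i 0) (Y.getD (i+1) 0) (Z.getD (i+1) 0) then
            PySem.Set.add s
              [(altTranspose (Y.take i ++ [Y.getD (i+1) 0, Y.getD i 0] ++ Y.drop (i+2))
                             (Z.take i ++ [Z.getD (i+1) 0, Z.getD i 0] ++ Z.drop (i+2))).1,
               (altTranspose (Y.take i ++ [Y.getD (i+1) 0, Y.getD i 0] ++ Y.drop (i+2))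
                             (Z.take i ++ [Z.getD (i+1) 0, Z.getD i 0] ++ Z.drop (i+2))).2]
          else s) s0 := by
  unfold altAdjSwaps
  exact foldl_add_map (List.range (Y.length - 1))
    (fun i => altCommutable (Y.getD i 0) (Z.getD i 0) (Y.getD (i+1) 0) (Z.getD (i+1) 0))
    (fun i => (Y.take i ++ [Y.getD (i+1) 0, Y.getD i 0] ++ Y.drop (i+2),
               Z.take i ++ [Z.getD (i+1) 0, Z.getD i 0] ++ Z.drop (i+2)))
    (fun p => [(altTranspose p.1 p.2).1, (altTranspose p.1 p.2).2]) PySem.Set.empty s0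

theorem cols_eq (X O : List Int) (init : PySem.Set (List (List Int))) :
    (List.range (X.length - 1)).foldl (fun s i =>
        if pvCommutable (X.getD i 0) (O.getD i 0) (X.getD (i+1) 0) (O.getD (i+1) 0) then
          PySem.Set.add s [(pvColSwap i X O).1, (pvColSwap i X O).2]
        else s) init
      = (List.range (X.length - 1)).foldl (fun s i =>
        if altCommutable (X.getD i 0) (O.getD i 0) (X.getD (i+1) 0) (O.getD (i+1) 0) then
          PySem.Set.add s [X.take i ++ [X.getD (i+1) 0, X.getD i 0] ++ X.drop (i+2),
                           O.take i ++ [O.getD (i+1) 0, O.getD i 0] ++ O.drop (i+2)]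
        else s) init := by
  apply PySem.List.foldl_congr_mem'
  intro i _ acc
  dsimp only
  rw [commutable_eq]
  rfl

theorem rows_eq (X O : List Int) (hlen : O.length = X.length)
    (hmem : ∀ i : Nat, i < X.length → Int.ofNat i ∈ X ∧ Int.ofNat i ∈ O)
    (hndX : X.Nodup) (hndO : O.Nodup)
    (init : PySem.Set (List (List Int))) :
    (List.range (X.length - 1)).foldl (fun s i =>
        if pvCommutable ((PySem.List.index? X (Int.ofNat i)).getD 0 : Nat)
            ((PySem.List.index? O (Int.ofNat i)).getD 0 : Nat)
            ((PySem.List.index? X (Int.ofNat i + 1)).getD 0 : Nat)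
            ((PySem.List.index? O (Int.ofNat i + 1)).getD 0 : Nat) then
          PySem.Set.add s [(pvRowSwap (Int.ofNat i) X O).1, (pvRowSwap (Int.ofNat i) X O).2]
        else s) init
      = (List.range (X.length - 1)).foldl (fun s i =>
        if altCommutable ((altTranspose X O).1.getD i 0) ((altTranspose X O).2.getD i 0)
            ((altTranspose X O).1.getD (i+1) 0) ((altTranspose X O).2.getD (i+1) 0) then
          PySem.Set.add s
            [(altTranspose
                (List.take i (altTranspose X O).1 ++
                    [(altTranspose X O).1.getD (i+1) 0, (altTranspose X O).1.getD i 0] ++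
                  List.drop (i+2) (altTranspose X O).1)
                (List.take i (altTranspose X O).2 ++
                    [(altTranspose X O).2.getD (i+1) 0, (altTranspose X O).2.getD i 0] ++
                  List.drop (i+2) (altTranspose X O).2)).1,
             (altTranspose
                (List.take i (altTranspose X O).1 ++
                    [(altTranspose X O).1.getD (i+1) 0, (altTranspose X O).1.getD i 0] ++
                  List.drop (i+2) (altTranspose X O).1)
                (List.take i (altTranspose X O).2 ++
                    [(altTranspose X O).2.getD (i+1) 0, (altTranspose X O).2.getD i 0] ++
                  List.drop (i+2) (altTranspose X O).2)).2]
        else s) init := by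
  apply PySem.List.foldl_congr_mem'
  intro i hi acc
  have hin : i + 1 < X.length := by
    have := List.mem_range.mp hi
    omega
  have hg1 : ∀ m : Nat, m < X.length →
      (altTranspose X O).1.getD m 0
        = (((PySem.List.index? X ((m : Nat) : Int)).getD 0 : Nat) : Int) :=
    fun m hm => getD_map_pyRange _ _ m hm 0
  have hg2 : ∀ m : Nat, m < X.length →
      (altTranspose X O).2.getD m 0
        = (((PySem.List.index? O ((m : Nat) : Int)).getD 0 : Nat) : Int) :=
    fun m hm => getD_map_pyRange _ _ m hm 0
  have hcond : pvCommutable ((PySem.List.index? X (Int.ofNat i)).getD 0 : Nat)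
        ((PySem.List.index? O (Int.ofNat i)).getD 0 : Nat)
        ((PySem.List.index? X (Int.ofNat i + 1)).getD 0 : Nat)
        ((PySem.List.index? O (Int.ofNat i + 1)).getD 0 : Nat)
      = altCommutable ((altTranspose X O).1.getD i 0)
          ((altTranspose X O).2.getD i 0)
          ((altTranspose X O).1.getD (i+1) 0)
          ((altTranspose X O).2.getD (i+1) 0) := by
    rw [hg1 i (by omega), hg1 (i+1) hin, hg2 i (by omega), hg2 (i+1) hin]
    exact commutable_eq _ _ _ _
  rw [hcond]
  split_ifs with hc
  · congr 1
    obtain ⟨p, hp⟩ := Option.isSome_iff_exists.mp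
      ((PySem.List.index?_isSome_iff X (Int.ofNat i)).mpr (hmem i (by omega)).1)
    obtain ⟨q, hq0⟩ := Option.isSome_iff_exists.mp
      ((PySem.List.index?_isSome_iff X (Int.ofNat (i+1))).mpr (hmem (i+1) hin).1)
    obtain ⟨p', hp'⟩ := Option.isSome_iff_exists.mp
      ((PySem.List.index?_isSome_iff O (Int.ofNat i)).mpr (hmem i (by omega)).2)
    obtain ⟨q', hq0'⟩ := Option.isSome_iff_exists.mp
      ((PySem.List.index?_isSome_iff O (Int.ofNat (i+1))).mpr (hmem (i+1) hin).2)
    have hq : PySem.List.index? X (Int.ofNat i + 1) = some q := hq0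
    have hq' : PySem.List.index? O (Int.ofNat i + 1) = some q' := hq0'
    simp only [pvRowSwap, hp, hq, hp', hq', Option.getD_some]
    rw [rowswap_eq X hndX (Int.ofNat i) p q hp hq,
        rowswap_eq O hndO (Int.ofNat i) p' q' hp' hq',
        alt_row_value X O i hlen (fun j hj => (hmem j hj).1)
          (fun j hj => (hmem j hj).2) hin]
    rfl
  · rfl

-- ===== VERDICT (by name: the statement is the Claim_ definition above) =====
set_option maxHeartbeats 1000000 in
theorem generate_commutation_equivalent_grids_spec : Claim_equal_generate_commutation_equivalent_grids := by
  intro grid _ hpre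
  unfold Spec_generate_commutation_equivalent_grids
  by_cases hn1 : grid.1.length ≤ 1
  · unfold generate_commutation_equivalent_grids generate_commutation_equivalent_grids_alt altAdjSwaps
    dsimp only
    have h0 : grid.1.length - 1 = 0 := by omega
    have h2 : ¬ (grid.1.length > 1) := by omega
    simp [h0, h2]
  · obtain h1 | ⟨hlen, hmem⟩ := hpre
    · omega
    have hgt : grid.1.length > 1 := by omega
    have hndX : grid.1.Nodup := nodup_of_covers _ _ rfl (fun i hi => (hmem i hi).1)
    have hndO : grid.2.Nodup := nodup_of_covers _ _ hlen (fun i hi => (hmem i hi).2)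
    unfold generate_commutation_equivalent_grids generate_commutation_equivalent_grids_alt
    dsimp only
    rw [if_pos hgt, altAdjSwaps_fold, altAdjSwaps_fold_transpose]
    have hTlen1 : (altTranspose grid.1 grid.2).1.length = grid.1.length :=
      length_map_pyRange _ _
    rw [hTlen1, rows_eq grid.1 grid.2 hlen hmem hndX hndO, cols_eq grid.1 grid.2]
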